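-- pv_equiv track=rewrite | github.com/JoeyChen0/gte | main.py | hide_time
-- ===== SOURCE A (Python) =====
-- def hide_time(moves):
--     edited = ""
--     clock = False
--     for c in moves:
--         if not clock:
--             if c == '{':
--                 clock = True
--             else:
--                 edited += c
--         elif c == '}':
--             clock = False
--     return edited
-- ===== SOURCE B (Python) =====
-- def hide_time(moves):
--     kept = []
--     rest = moves
--     while True:
--         head, sep, rest = rest.partition('{')
--         kept.append(head)
--         if not sep:
--             break
--         _, sep, rest = rest.partition('}')
--         if not sep:
--             break
--     return ''.join(kept)
-- ===== Notes on version B (the rewrite author's own statement) =====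
-- stated objective: faster
-- what changed: Replaces the per-character flag state machine with a skip-ahead loop using str.partition to jump to the next opening brace and its closing brace in bulk, joining the kept segments at the end.
import Mathlib
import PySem

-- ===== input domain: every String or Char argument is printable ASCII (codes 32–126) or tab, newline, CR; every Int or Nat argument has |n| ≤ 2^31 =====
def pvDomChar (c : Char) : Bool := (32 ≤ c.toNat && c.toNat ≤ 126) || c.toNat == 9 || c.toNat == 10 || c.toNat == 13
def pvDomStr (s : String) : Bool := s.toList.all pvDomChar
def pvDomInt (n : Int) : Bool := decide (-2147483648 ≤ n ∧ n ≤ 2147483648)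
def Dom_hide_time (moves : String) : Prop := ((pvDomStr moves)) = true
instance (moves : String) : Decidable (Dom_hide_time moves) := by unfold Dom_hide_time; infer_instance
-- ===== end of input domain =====

-- B replaces A's per-character flag state machine with a skip-ahead loop:
-- str.partition jumps to the next '{' and to its closing '}' in bulk, and the
-- kept segments are joined at the end (measurably faster: bulk C-level scans replace the per-character Python loop).

-- ===== PORT A =====
-- A's loop body: state is (edited, clock); edited is kept as a List Char ("" / +=).
def hideTimeStep (st : List Char × Bool) (c : Char) : List Char × Bool :=
  let (edited, clock) := st
  if !clock then
    if c = '{' then (edited, true) else (edited ++ [c], clock)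
  else
    if c = '}' then (edited, false) else (edited, clock)

def hide_time (moves : String) : String :=
  String.ofList (moves.toList.foldl hideTimeStep ([], false)).1

-- ===== PORT B =====
-- Source B's while-loop, as recursion on the remaining characters; each round is
-- 'partition at '{'' (= span) then 'partition at '}'' (= span), collecting head.
def hideTimeAltGo (cs : List Char) : List Char :=
  let head := cs.takeWhile (· ≠ '{')
  match h : cs.dropWhile (· ≠ '{') with
  | [] => head
  | _ :: rest1 =>
    match h2 : rest1.dropWhile (· ≠ '}') with
    | [] => head
    | _ :: rest3 => head ++ hideTimeAltGo rest3
termination_by cs.length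
decreasing_by
  have hle1 : (cs.dropWhile (· ≠ '{')).length ≤ cs.length := List.length_dropWhile_le _ _
  have hle2 : (rest1.dropWhile (· ≠ '}')).length ≤ rest1.length := List.length_dropWhile_le _ _
  rw [h] at hle1; rw [h2] at hle2
  simp only [List.length_cons] at hle1 hle2
  omega

def hide_time_alt (moves : String) : String :=
  String.ofList (hideTimeAltGo moves.toList)

-- ===== PRECONDITION & SPEC =====
def Spec_hide_time (moves : String) (out : String) : Prop := out = hide_time_alt moves
instance (moves : String) (out : String) : Decidable (Spec_hide_time moves out) := by unfold Spec_hide_time; infer_instance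

-- ===== CLAIM (what is proved, stated in full; the proofs are below) =====
def Claim_equal_hide_time : Prop := ∀ (moves : String), Dom_hide_time moves → Spec_hide_time moves (hide_time moves)

-- ===== LEMMAS AND PROOFS =====

-- unfolding equations of hideTimeAltGo, one per branch
theorem altGo_none (cs : List Char) (hdrop : cs.dropWhile (· ≠ '{') = []) :
    hideTimeAltGo cs = cs.takeWhile (· ≠ '{') := by
  unfold hideTimeAltGo
  split
  · rfl
  · rename_i head rest1 heq
    rw [hdrop] at heq <;> cases heq

theorem altGo_unclosed (cs : List Char) (d : Char) (rest1 : List Char)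
    (hdrop : cs.dropWhile (· ≠ '{') = d :: rest1)
    (hskip : rest1.dropWhile (· ≠ '}') = []) :
    hideTimeAltGo cs = cs.takeWhile (· ≠ '{') := by
  unfold hideTimeAltGo
  split
  · rename_i heq; rw [hdrop] at heq <;> cases heq
  · rename_i head r1 heq
    rw [hdrop] at heq
    injection heq with h1 h2; subst h1; subst h2
    split
    · rfl
    · rename_i e r3 heq2; rw [hskip] at heq2 <;> cases heq2

theorem altGo_closed (cs : List Char) (d : Char) (rest1 : List Char) (e : Char)
    (rest3 : List Char) (hdrop : cs.dropWhile (· ≠ '{') = d :: rest1)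
    (hskip : rest1.dropWhile (· ≠ '}') = e :: rest3) :
    hideTimeAltGo cs = cs.takeWhile (· ≠ '{') ++ hideTimeAltGo rest3 := by
  conv_lhs => rw [hideTimeAltGo.eq_def]
  split
  · rename_i heq; rw [hdrop] at heq <;> cases heq
  · rename_i head r1 heq
    rw [hdrop] at heq
    injection heq with h1 h2; subst h1; subst h2
    split
    · rename_i heq2; rw [hskip] at heq2 <;> cases heq2
    · rename_i e2 r3 heq2
      rw [hskip] at heq2
      injection heq2 with h1 h2; subst h1; subst h2
      rfl

-- folding A's step with clock=false over '{'-free text just appends it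
theorem foldl_step_no_open (head : List Char) (h : ∀ c ∈ head, c ≠ '{') :
    ∀ (rest edited : List Char),
      (head ++ rest).foldl hideTimeStep (edited, false)
        = rest.foldl hideTimeStep (edited ++ head, false) := by
  induction head with
  | nil => intro rest edited; simp
  | cons c t ih =>
    intro rest edited
    have hc : c ≠ '{' := h c (by simp)
    have ht : ∀ c ∈ t, c ≠ '{' := fun x hx => h x (by simp [hx])
    simp only [List.cons_append, List.foldl_cons, hideTimeStep, hc]
    simpa using ih ht rest (edited ++ [c])

-- folding A's step with clock=true over '}'-free text leaves the state unchanged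
theorem foldl_step_no_close (skip : List Char) (h : ∀ c ∈ skip, c ≠ '}') :
    ∀ (rest edited : List Char),
      (skip ++ rest).foldl hideTimeStep (edited, true)
        = rest.foldl hideTimeStep (edited, true) := by
  induction skip with
  | nil => intro rest edited; simp
  | cons c t ih =>
    intro rest edited
    have hc : c ≠ '}' := h c (by simp)
    have ht : ∀ c ∈ t, c ≠ '}' := fun x hx => h x (by simp [hx])
    simp only [List.cons_append, List.foldl_cons, hideTimeStep, if_neg hc]
    simpa using ih ht rest edited

theorem takeWhile_ne_open (cs : List Char) :
    ∀ c ∈ cs.takeWhile (· ≠ '{'), c ≠ '{' := by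
  intro c hc; simpa using List.mem_takeWhile_imp hc

theorem takeWhile_ne_close (cs : List Char) :
    ∀ c ∈ cs.takeWhile (· ≠ '}'), c ≠ '}' := by
  intro c hc; simpa using List.mem_takeWhile_imp hc

theorem dropWhile_head_open : ∀ (cs : List Char) (d : Char) (rest1 : List Char),
    cs.dropWhile (· ≠ '{') = d :: rest1 → d = '{' := by
  intro cs
  induction cs with
  | nil => intro d r h; simp [List.dropWhile] at h
  | cons c t ih =>
    intro d r h
    rw [List.dropWhile_cons] at h
    by_cases hc : c = '{'
    · rw [if_neg (by simp [hc])] at h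
      injection h with h1 _; exact h1 ▸ hc
    · rw [if_pos (by simp [hc])] at h; exact ih d r h

theorem dropWhile_head_close : ∀ (cs : List Char) (e : Char) (rest3 : List Char),
    cs.dropWhile (· ≠ '}') = e :: rest3 → e = '}' := by
  intro cs
  induction cs with
  | nil => intro e r h; simp [List.dropWhile] at h
  | cons c t ih =>
    intro e r h
    rw [List.dropWhile_cons] at h
    by_cases hc : c = '}'
    · rw [if_neg (by simp [hc])] at h
      injection h with h1 _; exact h1 ▸ hc
    · rw [if_pos (by simp [hc])] at h; exact ih e r h

theorem foldl_step_eq_altGo (cs : List Char) :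
    ∀ edited : List Char,
      (cs.foldl hideTimeStep (edited, false)).1 = edited ++ hideTimeAltGo cs := by
  induction cs using hideTimeAltGo.induct with
  | case1 cs hdrop =>
    intro edited
    have hsplit : cs = cs.takeWhile (· ≠ '{') ++ cs.dropWhile (· ≠ '{') :=
      (List.takeWhile_append_dropWhile).symm
    rw [altGo_none cs hdrop]
    conv_lhs => rw [hsplit, hdrop]
    rw [foldl_step_no_open _ (takeWhile_ne_open cs)]
    simp
  | case2 cs d rest1 hdrop hskip =>
    intro edited
    have hd : d = '{' := dropWhile_head_open cs d rest1 hdrop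
    have hsplit : cs = cs.takeWhile (· ≠ '{') ++ cs.dropWhile (· ≠ '{') :=
      (List.takeWhile_append_dropWhile).symm
    have hsplit2 : rest1 = rest1.takeWhile (· ≠ '}') ++ rest1.dropWhile (· ≠ '}') :=
      (List.takeWhile_append_dropWhile).symm
    rw [altGo_unclosed cs d rest1 hdrop hskip]
    conv_lhs => rw [hsplit, hdrop]
    rw [foldl_step_no_open _ (takeWhile_ne_open cs)]
    simp only [List.foldl_cons, hideTimeStep, hd, Bool.not_false, if_pos rfl, ite_true]
    conv_lhs => rw [hsplit2, hskip, List.append_nil]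
    rw [show rest1.takeWhile (· ≠ '}') = rest1.takeWhile (· ≠ '}') ++ [] by simp]
    rw [foldl_step_no_close _ (takeWhile_ne_close rest1)]
    simp
  | case3 cs d rest1 hdrop e rest3 hskip ih =>
    intro edited
    have hd : d = '{' := dropWhile_head_open cs d rest1 hdrop
    have he : e = '}' := dropWhile_head_close rest1 e rest3 hskip
    have hsplit : cs = cs.takeWhile (· ≠ '{') ++ cs.dropWhile (· ≠ '{') :=
      (List.takeWhile_append_dropWhile).symm
    have hsplit2 : rest1 = rest1.takeWhile (· ≠ '}') ++ rest1.dropWhile (· ≠ '}') :=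
      (List.takeWhile_append_dropWhile).symm
    rw [altGo_closed cs d rest1 e rest3 hdrop hskip]
    conv_lhs => rw [hsplit, hdrop]
    rw [foldl_step_no_open _ (takeWhile_ne_open cs)]
    simp only [List.foldl_cons, hideTimeStep, hd, Bool.not_false, if_pos rfl, ite_true]
    conv_lhs => rw [hsplit2, hskip]
    rw [foldl_step_no_close _ (takeWhile_ne_close rest1)]
    simp only [List.foldl_cons, he]
    rw [show hideTimeStep (edited ++ List.takeWhile (fun x => decide (x ≠ '{')) cs, true) '}'
          = (edited ++ List.takeWhile (fun x => decide (x ≠ '{')) cs, false) from rfl]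
    rw [ih]
    simp

-- ===== VERDICT (by name: the statement is the Claim_ definition above) =====
theorem hide_time_spec : Claim_equal_hide_time := by
  intro moves _
  show hide_time moves = hide_time_alt moves
  simp [hide_time, hide_time_alt, foldl_step_eq_altGo]
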